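-- pv_equiv track=rewrite | github.com/iHugoMMM/Projet_Markov | Code/secretaire.py | find_candidate_number
-- ===== SOURCE A (Python) =====
-- BEST_SCORE = 100
--
-- def find_candidate_number(secretaries):
--     counter = 0  # We keep track of the number of candidates so far.
--     best_candidate = 0  # We also keep track of the current best candidate
--     for secretary in secretaries:
--         #  When the best candidate is found, function returns the parameter y that would allow us to hire this applicant.
--         if secretary == BEST_SCORE:
--             return counter
--         if secretary > best_candidate:
--             counter += 1
--             best_candidate = secretary
-- ===== SOURCE B (Python) =====
-- BEST_SCORE = 100
--
-- def find_candidate_number(secretaries):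
--     # Pass 1: collect the prefix strictly before the first BEST_SCORE.
--     prefix = []
--     found = False
--     for secretary in secretaries:
--         if secretary == BEST_SCORE:
--             found = True
--             break
--         prefix.append(secretary)
--     if not found:
--         return None
--     # Pass 2: count strict record highs (above a running best starting at 0).
--     best = 0
--     counter = 0
--     for s in prefix:
--         if s > best:
--             counter += 1
--             best = s
--     return counter
-- ===== Notes on version B (the rewrite author's own statement) =====
-- stated objective: alternative
-- what changed: Replaces A's single fused loop (early return on BEST_SCORE while tracking records) by a two-pass decomposition: first build the prefix before the first 100 (returning None if absent), then count strict record highs in that prefix.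
import Mathlib
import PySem

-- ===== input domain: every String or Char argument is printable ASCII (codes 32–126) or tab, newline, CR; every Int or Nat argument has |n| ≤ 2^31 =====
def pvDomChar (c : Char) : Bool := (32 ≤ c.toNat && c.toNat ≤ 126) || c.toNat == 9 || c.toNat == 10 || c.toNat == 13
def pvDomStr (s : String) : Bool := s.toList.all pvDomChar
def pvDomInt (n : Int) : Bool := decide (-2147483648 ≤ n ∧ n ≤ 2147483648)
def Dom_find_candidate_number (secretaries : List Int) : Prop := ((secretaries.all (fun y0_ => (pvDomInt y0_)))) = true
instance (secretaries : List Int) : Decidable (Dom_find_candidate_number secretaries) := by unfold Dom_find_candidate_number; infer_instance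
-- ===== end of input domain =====

-- B replaces A's fused early-return loop with a two-pass decomposition (collect prefix before 100, then count records); objective: alternative.


-- ===== PORT A =====
-- A's fused loop: state (counter, best_candidate), early return on BEST_SCORE.
def findLoopA : List Int → Int → Int → Option Int
  | [], _, _ => none
  | s :: rest, counter, best =>
    if s = 100 then some counter
    else if s > best then findLoopA rest (counter + 1) s
    else findLoopA rest counter best

def find_candidate_number (secretaries : List Int) : Option Int :=
  findLoopA secretaries 0 0

-- ===== PORT B =====
-- Pass 1: prefix before the first 100, with a found flag.
def collectPrefix : List Int → List Int × Bool
  | [] => ([], false)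
  | s :: rest =>
    if s = 100 then ([], true)
    else
      let (p, f) := collectPrefix rest
      (s :: p, f)

-- Pass 2: count strict record highs in the prefix.
def recStep (cb : Int × Int) (s : Int) : Int × Int :=
  if s > cb.2 then (cb.1 + 1, s) else cb

def find_candidate_number_alt (secretaries : List Int) : Option Int :=
  let (p, f) := collectPrefix secretaries
  if f then some ((p.foldl recStep (0, 0)).1) else none

-- ===== PRECONDITION & SPEC =====
def Spec_find_candidate_number (secretaries : List Int) (out : Option Int) : Prop := out = find_candidate_number_alt secretaries
instance (secretaries : List Int) (out : Option Int) : Decidable (Spec_find_candidate_number secretaries out) := by unfold Spec_find_candidate_number; infer_instance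

-- ===== CLAIM (what is proved, stated in full; the proofs are below) =====
def Claim_equal_find_candidate_number : Prop := ∀ (secretaries : List Int), Dom_find_candidate_number secretaries → Spec_find_candidate_number secretaries (find_candidate_number secretaries)

-- ===== LEMMAS AND PROOFS =====
theorem findLoopA_eq (xs : List Int) : ∀ (c b : Int),
    findLoopA xs c b =
      (if (collectPrefix xs).2 then some (((collectPrefix xs).1.foldl recStep (c, b)).1) else none) := by
  induction xs with
  | nil => intro c b; simp [findLoopA, collectPrefix]
  | cons s rest ih =>
    intro c b
    by_cases h : s = 100
    · simp [findLoopA, collectPrefix, h]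
    · by_cases hg : s > b
      · simp [findLoopA, collectPrefix, h, hg, ih, recStep]
      · simp [findLoopA, collectPrefix, h, hg, ih, recStep]

-- ===== VERDICT (by name: the statement is the Claim_ definition above) =====
theorem find_candidate_number_spec : Claim_equal_find_candidate_number := by
  intro xs _
  unfold Spec_find_candidate_number find_candidate_number find_candidate_number_alt
  simpa using findLoopA_eq xs 0 0
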